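-- pv_equiv track=rewrite | github.com/DeliangZhong/MasterField | master_field/lattice.py | signed_area_2d
-- ===== SOURCE A (Python) =====
-- def signed_area_2d(word: tuple[int, ...]) -> int:
--     """Signed enclosed lattice area in 2D (shoelace formula).
--
--     Only meaningful for loops confined to D=2. Sign encodes orientation
--     (positive = counterclockwise).
--     """
--     x, y = 0, 0
--     path = [(0, 0)]
--     for step in word:
--         if step == 1:
--             x += 1
--         elif step == -1:
--             x -= 1
--         elif step == 2:
--             y += 1
--         elif step == -2:
--             y -= 1
--         else:
--             raise ValueError(f"signed_area_2d: step {step} not in {{±1, ±2}}")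
--         path.append((x, y))
--     # Shoelace
--     area2 = 0
--     for i in range(len(path) - 1):
--         x1, y1 = path[i]
--         x2, y2 = path[i + 1]
--         area2 += x1 * y2 - x2 * y1
--     return area2 // 2
-- ===== SOURCE B (Python) =====
-- def signed_area_2d(word: tuple[int, ...]) -> int:
--     """Single-pass shoelace: keep running (x, y) and add each step's
--     closed-form contribution directly; no path list is built."""
--     x = y = area2 = 0
--     for step in word:
--         if step == 1:
--             area2 -= y
--             x += 1
--         elif step == -1:
--             area2 += y
--             x -= 1
--         elif step == 2:
--             area2 += x
--             y += 1
--         elif step == -2: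
--             area2 -= x
--             y -= 1
--         else:
--             raise ValueError(f"signed_area_2d: step {step} not in {{±1, ±2}}")
--     return area2 // 2
-- ===== Notes on version B (the rewrite author's own statement) =====
-- stated objective: simpler
-- what changed: B never materialises the path list: one pass keeps running (x, y) and adds each step's closed-form shoelace contribution (-dx*y or x*dy) to a single accumulator, replacing A's build-path-then-shoelace two-pass structure.
import Mathlib
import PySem

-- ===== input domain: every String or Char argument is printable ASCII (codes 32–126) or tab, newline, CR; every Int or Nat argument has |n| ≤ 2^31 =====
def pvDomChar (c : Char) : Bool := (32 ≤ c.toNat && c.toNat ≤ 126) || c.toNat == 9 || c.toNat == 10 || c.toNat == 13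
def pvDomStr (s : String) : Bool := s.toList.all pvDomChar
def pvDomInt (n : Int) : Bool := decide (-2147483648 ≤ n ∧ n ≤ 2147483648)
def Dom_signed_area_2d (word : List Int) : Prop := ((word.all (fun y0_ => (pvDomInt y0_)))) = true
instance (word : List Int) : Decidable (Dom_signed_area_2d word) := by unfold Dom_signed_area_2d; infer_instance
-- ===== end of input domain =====

-- B replaces A's build-path-then-shoelace two passes by a single pass that adds each
-- step's closed-form shoelace contribution to one accumulator (simpler, O(1) space).


-- ===== PORT A =====
-- first loop of A: builds the path points after (x, y), updating (x, y) per step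
-- (the ValueError branch is outside Pre_; there the state is left unchanged)
def pathA (x y : Int) : List Int → List (Int × Int)
  | [] => []
  | step :: rest =>
    if step = 1 then (x + 1, y) :: pathA (x + 1) y rest
    else if step = -1 then (x - 1, y) :: pathA (x - 1) y rest
    else if step = 2 then (x, y + 1) :: pathA x (y + 1) rest
    else if step = -2 then (x, y - 1) :: pathA x (y - 1) rest
    else (x, y) :: pathA x y rest

-- second loop of A: shoelace sum over consecutive pairs of the path
def shoelaceA : List (Int × Int) → Int
  | (x1, y1) :: (x2, y2) :: rest => x1 * y2 - x2 * y1 + shoelaceA ((x2, y2) :: rest)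
  | _ => 0

def signed_area_2d (word : List Int) : Int :=
  PySem.Int.floordiv (shoelaceA ((0, 0) :: pathA 0 0 word)) 2

-- ===== PORT B =====
-- single loop of B over (x, y, area2)
def loopB (x y area2 : Int) : List Int → Int × Int × Int
  | [] => (x, y, area2)
  | step :: rest =>
    if step = 1 then loopB (x + 1) y (area2 - y) rest
    else if step = -1 then loopB (x - 1) y (area2 + y) rest
    else if step = 2 then loopB x (y + 1) (area2 + x) rest
    else if step = -2 then loopB x (y - 1) (area2 - x) rest
    else loopB x y area2 rest

def signed_area_2d_alt (word : List Int) : Int :=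
  PySem.Int.floordiv (loopB 0 0 0 word).2.2 2

-- ===== PRECONDITION & SPEC =====
-- Pre_ excludes exactly the words containing a step outside {±1, ±2}, on which Python A
-- (and Python B) raises ValueError.
def Pre_signed_area_2d (word : List Int) : Prop :=
  ∀ s ∈ word, s = 1 ∨ s = -1 ∨ s = 2 ∨ s = -2
instance (word : List Int) : Decidable (Pre_signed_area_2d word) := by
  unfold Pre_signed_area_2d; infer_instance
def pvWitness_signed_area_2d : List Int := [1, 2, -1, -2]

def Spec_signed_area_2d (word : List Int) (out : Int) : Prop := out = signed_area_2d_alt word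
instance (word : List Int) (out : Int) : Decidable (Spec_signed_area_2d word out) := by unfold Spec_signed_area_2d; infer_instance

-- ===== CLAIM (what is proved, stated in full; the proofs are below) =====
def Claim_equal_signed_area_2d : Prop := ∀ (word : List Int), Dom_signed_area_2d word → Pre_signed_area_2d word → Spec_signed_area_2d word (signed_area_2d word)

-- ===== LEMMAS AND PROOFS =====
theorem shoelace_cons (x1 y1 x2 y2 : Int) (rest : List (Int × Int)) :
    shoelaceA ((x1, y1) :: (x2, y2) :: rest) = x1 * y2 - x2 * y1 + shoelaceA ((x2, y2) :: rest) := rfl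

theorem shoelace_loop (word : List Int) : ∀ (x y a : Int),
    shoelaceA ((x, y) :: pathA x y word) + a = (loopB x y a word).2.2 := by
  induction word with
  | nil => intro x y a; simp [pathA, shoelaceA, loopB]
  | cons step rest ih =>
    intro x y a
    by_cases h1 : step = 1
    · subst h1
      rw [show pathA x y (1 :: rest) = (x + 1, y) :: pathA (x + 1) y rest from rfl,
          show loopB x y a (1 :: rest) = loopB (x + 1) y (a - y) rest from rfl,
          shoelace_cons, ← ih (x + 1) y (a - y)]
      ring
    · by_cases h2 : step = -1
      · subst h2
        rw [show pathA x y (-1 :: rest) = (x - 1, y) :: pathA (x - 1) y rest from rfl,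
            show loopB x y a (-1 :: rest) = loopB (x - 1) y (a + y) rest from rfl,
            shoelace_cons, ← ih (x - 1) y (a + y)]
        ring
      · by_cases h3 : step = 2
        · subst h3
          rw [show pathA x y (2 :: rest) = (x, y + 1) :: pathA x (y + 1) rest from rfl,
              show loopB x y a (2 :: rest) = loopB x (y + 1) (a + x) rest from rfl,
              shoelace_cons, ← ih x (y + 1) (a + x)]
          ring
        · by_cases h4 : step = -2
          · subst h4
            rw [show pathA x y (-2 :: rest) = (x, y - 1) :: pathA x (y - 1) rest from rfl,
                show loopB x y a (-2 :: rest) = loopB x (y - 1) (a - x) rest from rfl,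
                shoelace_cons, ← ih x (y - 1) (a - x)]
            ring
          · simp only [pathA, loopB, if_neg h1, if_neg h2, if_neg h3, if_neg h4,
              shoelace_cons, ← ih x y a]
            ring

-- ===== VERDICT (by name: the statement is the Claim_ definition above) =====
theorem signed_area_2d_spec : Claim_equal_signed_area_2d := by
  intro word _ _
  unfold Spec_signed_area_2d signed_area_2d signed_area_2d_alt
  rw [← shoelace_loop word 0 0 0, add_zero]
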